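-- pv_equiv track=rewrite | github.com/root-zw/nl2sql | server/nl2ir/hierarchical_retriever.py | _fuzzy_contains
-- ===== SOURCE A (Python) =====
-- def _fuzzy_contains(text_lower: str, pattern_lower: str, min_overlap: int = 2) -> bool:
--     if not pattern_lower:
--         return False
--     if pattern_lower in text_lower:
--         return True
--
--     length = len(pattern_lower)
--     for window in range(length, min_overlap - 1, -1):
--         for start in range(0, length - window + 1):
--             snippet = pattern_lower[start:start + window]
--             if len(snippet) >= min_overlap and snippet in text_lower:
--                 return True
--     return False
-- ===== SOURCE B (Python) =====
-- def _fuzzy_contains(text_lower: str, pattern_lower: str, min_overlap: int = 2) -> bool: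
--     if not pattern_lower:
--         return False
--     if min_overlap <= 0:
--         return True
--     if len(pattern_lower) < min_overlap:
--         return pattern_lower in text_lower
--     k = min_overlap
--     grams = {text_lower[i:i + k] for i in range(len(text_lower) - k + 1)}
--     return any(pattern_lower[i:i + k] in grams for i in range(len(pattern_lower) - k + 1))
-- ===== Notes on version B (the rewrite author's own statement) =====
-- stated objective: faster
-- what changed: B replaces A's nested window/start loops that re-scan the text for every substring length with a precomputed set of the text's min_overlap-grams and a single pass over the pattern's min_overlap-grams (any longer shared substring contains a shared min_overlap-gram).
import Mathlib
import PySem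

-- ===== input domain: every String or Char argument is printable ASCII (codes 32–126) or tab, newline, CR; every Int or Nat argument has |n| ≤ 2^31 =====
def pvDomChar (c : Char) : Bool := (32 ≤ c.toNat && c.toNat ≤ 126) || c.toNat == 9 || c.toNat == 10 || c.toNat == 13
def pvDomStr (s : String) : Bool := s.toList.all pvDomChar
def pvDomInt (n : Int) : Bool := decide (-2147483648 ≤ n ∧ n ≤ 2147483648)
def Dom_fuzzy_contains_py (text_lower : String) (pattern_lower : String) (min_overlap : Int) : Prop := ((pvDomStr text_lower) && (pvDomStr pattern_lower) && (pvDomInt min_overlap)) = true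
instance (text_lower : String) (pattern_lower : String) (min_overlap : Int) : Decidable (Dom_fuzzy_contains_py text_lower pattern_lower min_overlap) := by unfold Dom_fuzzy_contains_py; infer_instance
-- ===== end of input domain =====

-- B replaces A's nested window/start re-scan of the text with a precomputed k-gram index of
-- the text and a single pass over the pattern's k-grams (objective: faster).

-- ===== PORT A =====
-- A's 'for window in range(length, min_overlap - 1, -1)' with its early 'return True', as a
-- fuel-counted countdown over the same window values (fuel = the number of loop iterations;
-- it only makes the loop total/lazy, the iterations and tests are A's)
def pvWindowLoopA (text_lower : String) (pattern_lower : String) (min_overlap : Int)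
    (length : Int) : Nat → Int → Bool
  | 0, _ => false
  | fuel + 1, window =>
      ((PySem.List.pyRange 0 (length - window + 1) 1).any fun start =>
        let snippet := PySem.Str.slice pattern_lower (some start) (some (start + window))
        decide (min_overlap ≤ PySem.Str.len snippet) && PySem.Str.isIn snippet text_lower)
      || pvWindowLoopA text_lower pattern_lower min_overlap length fuel (window - 1)

def fuzzy_contains_py (text_lower : String) (pattern_lower : String) (min_overlap : Int) : Bool :=
  if PySem.Str.len pattern_lower == 0 then false
  else if PySem.Str.isIn pattern_lower text_lower then true
  else
    let length := PySem.Str.len pattern_lower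
    pvWindowLoopA text_lower pattern_lower min_overlap length
      (length - (min_overlap - 1)).toNat length

-- ===== PORT B =====
def fuzzy_contains_py_alt (text_lower : String) (pattern_lower : String) (min_overlap : Int) : Bool :=
  if PySem.Str.len pattern_lower == 0 then false
  else if min_overlap ≤ 0 then true
  else if PySem.Str.len pattern_lower < min_overlap then PySem.Str.isIn pattern_lower text_lower
  else
    let grams : PySem.Set String := PySem.Set.ofList
      ((PySem.List.pyRange 0 (PySem.Str.len text_lower - min_overlap + 1) 1).map fun i =>
        PySem.Str.slice text_lower (some i) (some (i + min_overlap)))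
    (PySem.List.pyRange 0 (PySem.Str.len pattern_lower - min_overlap + 1) 1).any fun i =>
      grams.contains (PySem.Str.slice pattern_lower (some i) (some (i + min_overlap)))

-- ===== PRECONDITION & SPEC =====
def Spec_fuzzy_contains_py (text_lower : String) (pattern_lower : String) (min_overlap : Int) (out : Bool) : Prop := out = fuzzy_contains_py_alt text_lower pattern_lower min_overlap
instance (text_lower : String) (pattern_lower : String) (min_overlap : Int) (out : Bool) : Decidable (Spec_fuzzy_contains_py text_lower pattern_lower min_overlap out) := by unfold Spec_fuzzy_contains_py; infer_instance

-- ===== CLAIM (what is proved, stated in full; the proofs are below) =====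
def Claim_equal_fuzzy_contains_py : Prop := ∀ (text_lower : String) (pattern_lower : String) (min_overlap : Int), Dom_fuzzy_contains_py text_lower pattern_lower min_overlap → Spec_fuzzy_contains_py text_lower pattern_lower min_overlap (fuzzy_contains_py text_lower pattern_lower min_overlap)

-- ===== LEMMAS AND PROOFS =====


lemma pvLL (s : String) : s.toList.length = s.length := by simp

lemma pvLenNe0 (p : String) (hp : p.toList ≠ []) : ¬((PySem.Str.len p == 0) = true) := by
  simp [PySem.Str.len_eq]
  rintro rfl
  exact hp (by decide)

-- the fuel countdown of port A is the 'any' over the window range it iterates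
lemma pvWindowLoopA_eq (t p : String) (m L : Int) : ∀ (fuel : Nat) (w : Int),
    (w - (m - 1)).toNat = fuel →
    pvWindowLoopA t p m L fuel w
      = (PySem.List.pyRange w (m - 1) (-1)).any fun window =>
          (PySem.List.pyRange 0 (L - window + 1) 1).any fun start =>
            let snippet := PySem.Str.slice p (some start) (some (start + window))
            decide (m ≤ PySem.Str.len snippet) && PySem.Str.isIn snippet t := by
  intro fuel
  induction fuel with
  | zero =>
    intro w h
    rw [PySem.List.pyRange_neg_one_eq_nil (by omega)]
    rfl
  | succ n ih =>
    intro w h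
    rw [PySem.List.pyRange_neg_one_cons (by omega), List.any_cons,
      pvWindowLoopA, ih (w - 1) (by omega)]

-- a take of a drop is an infix
lemma pvTakeDropInfix {α : Type} (xs : List α) (j k : Nat) : (xs.drop j).take k <:+: xs :=
  ((List.take_prefix k (xs.drop j)).isInfix).trans (List.drop_suffix j xs).isInfix

-- the common characterisation: some length-(m.toNat) substring of the pattern occurs in the text
def pvHasGram (t p : String) (m : Int) : Prop :=
  ∃ j : Nat, j + m.toNat ≤ p.toList.length ∧ ((p.toList.drop j).take m.toNat) <:+: t.toList

lemma pvSliceToList (s : String) (a : Int) (w : Int) (ha : 0 ≤ a) (hw : 0 ≤ w) :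
    (PySem.Str.slice s (some a) (some (a + w))).toList = (s.toList.drop a.toNat).take w.toNat := by
  rw [PySem.Str.toList_slice, PySem.Chars.slice_eq_listSlice,
    PySem.List.slice_toNat s.toList ha (by omega)]
  congr 1
  omega

lemma pvA_true_iff (t p : String) (m : Int) (hp : p.toList ≠ []) (hm1 : 0 < m)
    (hmL : m ≤ (p.toList.length : Int)) :
    fuzzy_contains_py t p m = true ↔ pvHasGram t p m := by
  unfold fuzzy_contains_py
  rw [if_neg (pvLenNe0 p hp), pvWindowLoopA_eq t p m _ _ _ rfl]
  by_cases hin : PySem.Str.isIn p t = true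
  · rw [if_pos hin]
    refine iff_of_true rfl ⟨0, by omega, ?_⟩
    simp only [List.drop_zero]
    exact ((List.take_prefix _ _).isInfix).trans ((PySem.Str.isIn_iff_infix p t).mp hin)
  · rw [if_neg hin]
    simp only [List.any_eq_true]
    constructor
    · rintro ⟨w, hwmem, s, hsmem, hcond⟩
      rw [PySem.List.mem_pyRange_neg_one] at hwmem
      rw [PySem.List.mem_pyRange_one] at hsmem
      simp only [Bool.and_eq_true, decide_eq_true_eq] at hcond
      obtain ⟨-, hsin⟩ := hcond
      rw [PySem.Str.isIn_iff_infix] at hsin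
      rw [pvSliceToList p s w (by omega) (by omega)] at hsin
      refine ⟨s.toNat, by simp [PySem.Str.len_eq] at hwmem hsmem ⊢; omega, ?_⟩
      have hk : m.toNat ≤ w.toNat := by omega
      have hEq : (p.toList.drop s.toNat).take m.toNat
          = ((p.toList.drop s.toNat).take w.toNat).take m.toNat := by
        rw [List.take_take]
        congr 1
        omega
      rw [hEq]
      exact ((List.take_prefix _ _).isInfix).trans hsin
    · rintro ⟨j, hjk, hinf⟩
      refine ⟨m, ?_, (j : Int), ?_, ?_⟩
      · rw [PySem.List.mem_pyRange_neg_one]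
        have hLL := pvLL p
        simp [PySem.Str.len_eq]; omega
      · rw [PySem.List.mem_pyRange_one]
        have hLL := pvLL p
        simp [PySem.Str.len_eq]; omega
      · simp only [Bool.and_eq_true, decide_eq_true_eq]
        have hsl := pvSliceToList p (j : Int) m (by omega) (by omega)
        simp only [Int.toNat_natCast] at hsl
        constructor
        · rw [PySem.Str.len_eq, hsl]
          simp only [List.length_take, List.length_drop]
          omega
        · rw [PySem.Str.isIn_iff_infix, hsl]
          exact hinf

lemma pvB_true_iff (t p : String) (m : Int) (hp : p.toList ≠ []) (hm1 : 0 < m)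
    (hmL : m ≤ (p.toList.length : Int)) :
    fuzzy_contains_py_alt t p m = true ↔ pvHasGram t p m := by
  unfold fuzzy_contains_py_alt
  rw [if_neg (pvLenNe0 p hp)]
  rw [if_neg (by omega)]
  rw [if_neg (by rw [PySem.Str.len_eq]; omega)]
  simp only [List.any_eq_true]
  constructor
  · rintro ⟨i, himem, hcont⟩
    rw [PySem.List.mem_pyRange_one] at himem
    rw [PySem.Set.contains_iff, PySem.Set.mem_ofList, List.mem_map] at hcont
    obtain ⟨i2, hi2mem, heq⟩ := hcont
    rw [PySem.List.mem_pyRange_one] at hi2mem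
    refine ⟨i.toNat, by simp [PySem.Str.len_eq] at himem ⊢; omega, ?_⟩
    have h1 := pvSliceToList p i m (by omega) (by omega)
    have h2 := pvSliceToList t i2 m (by omega) (by omega)
    rw [← h1, ← heq, h2]
    exact pvTakeDropInfix _ _ _
  · rintro ⟨j, hjk, hinf⟩
    refine ⟨(j : Int), ?_, ?_⟩
    · rw [PySem.List.mem_pyRange_one]
      have hLL := pvLL p
      simp [PySem.Str.len_eq]; omega
    · rw [PySem.Set.contains_iff, PySem.Set.mem_ofList, List.mem_map]
      obtain ⟨pre, suf, hsplit⟩ := hinf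
      have hlen : ((p.toList.drop j).take m.toNat).length = m.toNat := by
        simp only [List.length_take, List.length_drop]; omega
      refine ⟨(pre.length : Int), ?_, ?_⟩
      · rw [PySem.List.mem_pyRange_one]
        have : t.toList.length = pre.length + m.toNat + suf.length := by
          rw [← hsplit]; simp [hlen]; omega
        have hLL := pvLL t
        simp [PySem.Str.len_eq]; omega
      · apply String.toList_inj.mp
        rw [pvSliceToList t (pre.length : Int) m (by omega) (by omega),
          pvSliceToList p (j : Int) m (by omega) (by omega)]
        simp only [Int.toNat_natCast]
        have hdrop : t.toList.drop pre.length = (p.toList.drop j).take m.toNat ++ suf := by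
          rw [← hsplit, List.append_assoc, List.drop_left]
        rw [hdrop, List.take_append_of_le_length (by omega), List.take_of_length_le (by omega)]

-- ===== VERDICT (by name: the statement is the Claim_ definition above) =====
theorem fuzzy_contains_py_spec : Claim_equal_fuzzy_contains_py := by
  intro t p m _hdom
  unfold Spec_fuzzy_contains_py
  by_cases hp : p.toList = []
  · unfold fuzzy_contains_py fuzzy_contains_py_alt
    rw [if_pos (by simp [PySem.Str.len_eq, hp] : (PySem.Str.len p == 0) = true),
      if_pos (by simp [PySem.Str.len_eq, hp] : (PySem.Str.len p == 0) = true)]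
  · by_cases hm0 : m ≤ 0
    · -- A finds the empty snippet (window 0), B returns true immediately
      have hB : fuzzy_contains_py_alt t p m = true := by
        unfold fuzzy_contains_py_alt
        rw [if_neg (pvLenNe0 p hp), if_pos hm0]
      have hA : fuzzy_contains_py t p m = true := by
        unfold fuzzy_contains_py
        rw [if_neg (pvLenNe0 p hp), pvWindowLoopA_eq t p m _ _ _ rfl]
        by_cases hin : PySem.Str.isIn p t = true
        · rw [if_pos hin]
        · rw [if_neg hin]
          simp only [List.any_eq_true]
          refine ⟨0, ?_, 0, ?_, ?_⟩
          · rw [PySem.List.mem_pyRange_neg_one, PySem.Str.len_eq]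
            have h0 : 0 < p.toList.length := List.length_pos_of_ne_nil hp
            omega
          · rw [PySem.List.mem_pyRange_one, PySem.Str.len_eq]
            have h0 : 0 < p.toList.length := List.length_pos_of_ne_nil hp
            omega
          · simp only [Bool.and_eq_true, decide_eq_true_eq]
            have hsl := pvSliceToList p 0 0 le_rfl le_rfl
            simp only [Int.toNat_zero, List.take_zero] at hsl
            constructor
            · rw [PySem.Str.len_eq, hsl]; simp; omega
            · rw [PySem.Str.isIn_iff_infix, hsl]; exact List.nil_infix
      rw [hA, hB]
    · by_cases hmL : (p.toList.length : Int) < m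
      · -- window loop is empty in A; B falls back to the plain containment test
        have hA : fuzzy_contains_py t p m = PySem.Str.isIn p t := by
          unfold fuzzy_contains_py
          rw [if_neg (pvLenNe0 p hp), pvWindowLoopA_eq t p m _ _ _ rfl]
          cases hin : PySem.Str.isIn p t
          case true => simp
          case false =>
            simp
            intro x hx1 hx2
            exfalso
            have hLL := pvLL p
            omega
        have hB : fuzzy_contains_py_alt t p m = PySem.Str.isIn p t := by
          unfold fuzzy_contains_py_alt
          rw [if_neg (pvLenNe0 p hp), if_neg hm0, if_pos (by rw [PySem.Str.len_eq]; omega)]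
        rw [hA, hB]
      · rw [Bool.eq_iff_iff, pvA_true_iff t p m hp (by omega) (by omega),
          pvB_true_iff t p m hp (by omega) (by omega)]
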